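-- pv_equiv track=rewrite | github.com/Sarada123-eng/contextual-causal-conversation-engine | src/chunks.py | _window_indices
-- ===== SOURCE A (Python) =====
-- from typing import Any, Dict, Iterable, Iterator, List, Optional, Sequence, Tuple
--
-- def _window_indices(total: int, window_size: int, overlap: int) -> Iterator[Tuple[int, int]]:
-- 	if window_size <= 0:
-- 		raise ValueError("window_size must be positive.")
-- 	if overlap < 0:
-- 		raise ValueError("overlap must be non-negative.")
-- 	if overlap >= window_size:
-- 		raise ValueError("overlap must be smaller than window_size.")
--
-- 	step = window_size - overlap
-- 	start = 0
-- 	while start < total: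
-- 		end = min(start + window_size, total)
-- 		yield start, end
-- 		if end == total:
-- 			break
-- 		start += step
-- ===== SOURCE B (Python) =====
-- from typing import Iterator, Tuple
--
-- def _window_indices(total: int, window_size: int, overlap: int) -> Iterator[Tuple[int, int]]:
-- 	if window_size <= 0:
-- 		raise ValueError("window_size must be positive.")
-- 	if overlap < 0:
-- 		raise ValueError("overlap must be non-negative.")
-- 	if overlap >= window_size:
-- 		raise ValueError("overlap must be smaller than window_size.")
--
-- 	step = window_size - overlap
-- 	if total <= 0:
-- 		return
-- 	# number of windows in closed form: 1 + ceil(max(0, total - window_size) / step)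
-- 	count = 1 + max(0, -(-(total - window_size) // step))
-- 	for i in range(count):
-- 		yield i * step, min(i * step + window_size, total)
-- ===== Notes on version B (the rewrite author's own statement) =====
-- stated objective: alternative
-- what changed: Replaces the incremental while-loop-with-break by computing the window count up front in closed form (ceiling division) and yielding each window from its index in one indexed pass.
import Mathlib
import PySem

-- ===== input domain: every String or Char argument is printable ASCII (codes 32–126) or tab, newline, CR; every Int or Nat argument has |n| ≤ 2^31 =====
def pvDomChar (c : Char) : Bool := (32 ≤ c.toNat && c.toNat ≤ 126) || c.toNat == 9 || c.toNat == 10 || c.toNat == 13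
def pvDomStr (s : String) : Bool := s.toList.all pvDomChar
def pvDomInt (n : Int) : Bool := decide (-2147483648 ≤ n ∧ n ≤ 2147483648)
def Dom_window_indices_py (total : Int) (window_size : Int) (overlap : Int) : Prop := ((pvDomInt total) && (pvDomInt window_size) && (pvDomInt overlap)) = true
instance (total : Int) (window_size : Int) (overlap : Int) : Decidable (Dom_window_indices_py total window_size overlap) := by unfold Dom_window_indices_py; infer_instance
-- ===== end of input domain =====

-- B computes the window count up front by ceiling division and maps over the indices,
-- instead of A's incremental while-loop-with-break; same cost, different decomposition.

-- ===== PORT A =====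
-- A's while loop: start advances by step until start < total fails or the window reaches total.
-- fuel bounds the iteration count (total.toNat suffices since step ≥ 1 under Pre_).
def winLoopA (step ws total : Int) (fuel : Nat) (start : Int) : List (Int × Int) :=
  match fuel with
  | 0 => []
  | f + 1 =>
    if start < total then
      let e := min (start + ws) total
      (start, e) :: (if e = total then [] else winLoopA step ws total f (start + step))
    else []

def window_indices_py (total : Int) (window_size : Int) (overlap : Int) : List (Int × Int) :=
  if window_size ≤ 0 ∨ overlap < 0 ∨ overlap ≥ window_size then []   -- Python raises ValueError here (outside Pre_)
  else winLoopA (window_size - overlap) window_size total total.toNat 0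

-- ===== PORT B =====
def window_indices_py_alt (total : Int) (window_size : Int) (overlap : Int) : List (Int × Int) :=
  if window_size ≤ 0 ∨ overlap < 0 ∨ overlap ≥ window_size then []   -- Python raises ValueError here (outside Pre_)
  else
    let step := window_size - overlap
    if total ≤ 0 then []
    else
      let count := 1 + max 0 (-(PySem.Int.floordiv (-(total - window_size)) step))
      (PySem.List.pyRange 0 count 1).map (fun i => (i * step, min (i * step + window_size) total))

-- ===== PRECONDITION & SPEC =====
-- Pre_ excludes exactly the inputs on which A raises ValueError (the three guards).
def Pre_window_indices_py (total : Int) (window_size : Int) (overlap : Int) : Prop :=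
  0 < window_size ∧ 0 ≤ overlap ∧ overlap < window_size
instance (total : Int) (window_size : Int) (overlap : Int) : Decidable (Pre_window_indices_py total window_size overlap) := by unfold Pre_window_indices_py; infer_instance
def pvWitness_window_indices_py : Int × Int × Int := (10, 4, 2)

def Spec_window_indices_py (total : Int) (window_size : Int) (overlap : Int) (out : List (Int × Int)) : Prop := out = window_indices_py_alt total window_size overlap
instance (total : Int) (window_size : Int) (overlap : Int) (out : List (Int × Int)) : Decidable (Spec_window_indices_py total window_size overlap out) := by unfold Spec_window_indices_py; infer_instance

-- ===== CLAIM (what is proved, stated in full; the proofs are below) =====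
def Claim_equal_window_indices_py : Prop := ∀ (total : Int) (window_size : Int) (overlap : Int), Dom_window_indices_py total window_size overlap → Pre_window_indices_py total window_size overlap → Spec_window_indices_py total window_size overlap (window_indices_py total window_size overlap)

-- ===== LEMMAS AND PROOFS =====

-- A's loop, started at s < total, equals the closed-form indexed map over the remaining window count.
theorem winLoopA_eq (total ws step : Int) (hstep : 0 < step) (hws : step ≤ ws) :
    ∀ (fuel : Nat) (s : Int), 0 ≤ s → s < total → (total - s).toNat ≤ fuel →
      winLoopA step ws total fuel s =
        (PySem.List.pyRange 0 (1 + max 0 (-(PySem.Int.floordiv (-(total - s - ws)) step))) 1).map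
          (fun i => (s + i * step, min (s + i * step + ws) total)) := by
  intro fuel
  induction fuel with
  | zero => intro s _ hlt hle; omega
  | succ f ih =>
    intro s hs hlt hle
    by_cases hend : total ≤ s + ws
    · -- last window: e = total, ceiling ≤ 0, count = 1
      have hc : -(PySem.Int.floordiv (-(total - s - ws)) step) ≤ 0 := by
        rw [PySem.Int.floordiv_eq_ediv_of_pos hstep]
        have : (0:Int) ≤ (-(total - s - ws)) / step := Int.ediv_nonneg (by omega) (by omega)
        omega
      have hm : max 0 (-(PySem.Int.floordiv (-(total - s - ws)) step)) = 0 := by omega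
      rw [hm]
      simp only [winLoopA, if_pos hlt]
      have he : min (s + ws) total = total := by omega
      rw [he, if_pos rfl]
      rw [show (1 + 0 : Int) = 0 + 1 by ring, PySem.List.pyRange_one_singleton]
      simp only [List.map_cons, List.map_nil, zero_mul, add_zero]
      rw [he]
    · -- not the last window: peel one iteration, shift the index range
      push_neg at hend
      set a := total - s - ws with ha
      have hapos : 0 < a := by omega
      set c := -(PySem.Int.floordiv (-a) step) with hc
      have hbounds : (c - 1) * step < a ∧ a ≤ c * step :=
        (PySem.Int.neg_floordiv_neg_eq_iff_of_pos hstep).mp rfl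
      have hc1 : 1 ≤ c := by nlinarith [hbounds.1, hbounds.2]
      -- ceiling recurrence: the count after one step is c - 1
      have hrec : -(PySem.Int.floordiv (-(total - (s + step) - ws)) step) = c - 1 := by
        rw [PySem.Int.neg_floordiv_neg_eq_iff_of_pos hstep]
        constructor <;> nlinarith [hbounds.1, hbounds.2]
      have hm : 1 + max 0 c = c + 1 := by omega
      simp only [winLoopA, if_pos hlt]
      have hne : min (s + ws) total ≠ total := by omega
      rw [if_neg hne]
      have hs' : s + step < total := by nlinarith [hbounds.2]
      rw [ih (s + step) (by omega) hs' (by omega)]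
      have hm' : 1 + max 0 (-(PySem.Int.floordiv (-(total - (s + step) - ws)) step)) = c := by
        rw [hrec]; omega
      rw [hm', hm]
      rw [PySem.List.pyRange_one_cons (by omega : (0:Int) < c + 1)]
      rw [show (0:Int) + 1 = 1 by ring]
      rw [PySem.List.pyRange_one 1 (c+1), PySem.List.pyRange_one 0 c]
      have hcc : (c + 1 - 1).toNat = (c - 0).toNat := by omega
      rw [hcc]
      simp only [List.map_cons, List.map_map, zero_mul, add_zero]
      have hmin : min (s + ws) total = s + ws := by omega
      rw [hmin]
      refine congrArg₂ _ rfl ?_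
      apply List.map_congr_left
      intro k _
      simp only [Function.comp_apply]
      have hk : s + step + (0 + (k:Int)) * step = s + (1 + (k:Int)) * step := by ring
      rw [hk]

-- ===== VERDICT (by name: the statement is the Claim_ definition above) =====
theorem window_indices_py_spec : Claim_equal_window_indices_py := by
  intro total ws ov _ hpre
  obtain ⟨h1, h2, h3⟩ := hpre
  unfold Spec_window_indices_py window_indices_py window_indices_py_alt
  have hg : ¬ (ws ≤ 0 ∨ ov < 0 ∨ ov ≥ ws) := by omega
  rw [if_neg hg, if_neg hg]
  by_cases ht : total ≤ 0
  · rw [if_pos ht]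
    rcases Nat.eq_zero_or_pos total.toNat with h | h
    · simp [winLoopA, h]
    · omega
  · rw [if_neg ht]
    push_neg at ht
    rw [winLoopA_eq total ws (ws - ov) (by omega) (by omega) total.toNat 0 le_rfl ht (by omega)]
    simp only [zero_add, Int.sub_zero]
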